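-- pv_equiv track=rewrite | github.com/JohanWulff/cms_runII_processing_tools | getSumW.py | get_sample_id
-- ===== SOURCE A (Python) =====
-- def get_sample_id(skim: str):
--     if any(y in skim for y in ['2016', '2017', '2018']):
--         # data skims
--         return 0
--     elif "radion" in skim.lower():
--         if "vbf" in skim.lower():
--             return -4
--         elif "ggf" in skim.lower():
--             return -3
--         else:
--             raise ValueError(f"Radion (signal) skim found but neither vbf nor ggf in {skim}")
--     elif "graviton" in skim.lower():
--         if "vbf" in skim.lower():
--             return -2
--         elif "ggf" in skim.lower():
--             return -1
--         else:
--             raise ValueError(f"Graviton (signal) skim found but neither vbf nor ggf in {skim}")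
--     else:
--         if "DY_" in skim:
--             return 1
--         elif "TT_" in skim:
--             return 2
--         elif "ST_" in skim:
--             return 3
--         elif "WJets_" in skim:
--             return 4
--         elif "EWK" in skim:
--             return 5
--         elif any(s in skim for s in ["TTZTo", "TTWJets"]):
--             return 6
--         elif any(s in skim for s in ["TTWW", 'TTWZ', 'TTZZ']):
--             return 7
--         elif any(s in skim for s in ["TTZH", "TTWH"]):
--             return 8
--         elif "ttHTo" in skim:
--             return 9
--         elif any(s in skim for s in ["VBFHTo","GluGluHTo"]):
--             return 10
--         elif "GGHH_SM" in skim: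
--             return 11
--         elif any(s in skim for s in ["WminusHTo","WplusHTo"]):
--             return 12
--         elif any(s in skim for s in ["ZH_HTo","ZHTo"]):
--             return 13
--         elif any(s in skim for s in ["WWW","WWZ","WZZ","ZZZ"]):
--             return 14
--         elif any(s in skim for s in ["WW", "WZ", "ZZ"]):
--             return 15
--         else:
--             raise ValueError(f"Cannot associate skim {skim} with an ID")
-- ===== SOURCE B (Python) =====
-- # Substring -> id table; ids are nondecreasing in A's check order, so the
-- # minimum id over ALL matches equals the first match of the cascade.
-- PATTERNS = {
--     "DY_": 1, "TT_": 2, "ST_": 3, "WJets_": 4, "EWK": 5,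
--     "TTZTo": 6, "TTWJets": 6,
--     "TTWW": 7, "TTWZ": 7, "TTZZ": 7,
--     "TTZH": 8, "TTWH": 8,
--     "ttHTo": 9,
--     "VBFHTo": 10, "GluGluHTo": 10,
--     "GGHH_SM": 11,
--     "WminusHTo": 12, "WplusHTo": 12,
--     "ZH_HTo": 13, "ZHTo": 13,
--     "WWW": 14, "WWZ": 14, "WZZ": 14, "ZZZ": 14,
--     "WW": 15, "WZ": 15, "ZZ": 15,
-- }
--
--
-- def get_sample_id(skim: str):
--     if any(y in skim for y in ('2016', '2017', '2018')):
--         return 0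
--     low = skim.lower()
--     if 'radion' in low or 'graviton' in low:
--         if 'vbf' not in low and 'ggf' not in low:
--             name = 'Radion' if 'radion' in low else 'Graviton'
--             raise ValueError(
--                 f"{name} (signal) skim found but neither vbf nor ggf in {skim}")
--         return (-4 if 'radion' in low else -2) + (0 if 'vbf' in low else 1)
--     ids = [i for s, i in PATTERNS.items() if s in skim]
--     if not ids:
--         raise ValueError(f"Cannot associate skim {skim} with an ID")
--     return min(ids)
-- ===== Notes on version B (the rewrite author's own statement) =====
-- stated objective: simpler
-- what changed: Replaces the ordered first-match elif cascade with a flat substring-to-id table whose ALL matches are collected and the minimum id returned (valid because ids are nondecreasing in A's check order), and computes the radion/graviton ids by one arithmetic expression (base offset + ggf adjustment) instead of four nested branches.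
import Mathlib
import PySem

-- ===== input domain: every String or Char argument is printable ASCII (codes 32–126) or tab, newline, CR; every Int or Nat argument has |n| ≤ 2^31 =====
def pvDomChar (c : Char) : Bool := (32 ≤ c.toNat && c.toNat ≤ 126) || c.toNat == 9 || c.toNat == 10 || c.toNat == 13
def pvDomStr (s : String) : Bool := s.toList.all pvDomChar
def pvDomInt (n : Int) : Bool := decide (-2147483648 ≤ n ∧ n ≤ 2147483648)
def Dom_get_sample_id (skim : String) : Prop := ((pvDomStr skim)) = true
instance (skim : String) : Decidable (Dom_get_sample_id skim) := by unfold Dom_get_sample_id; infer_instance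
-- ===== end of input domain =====

-- B replaces A's first-match elif cascade by a flat substring→id table: it collects ALL
-- matching ids and returns their minimum (correct because ids are nondecreasing in A's
-- check order), and computes the signal ids arithmetically; objective: simpler.
-- Raising inputs of A are excluded by Pre_ (ports return -100 there).

-- ===== PORT A =====
-- literal transliteration of A's cascade; raise branches (excluded by Pre_) return -100
def get_sample_id (skim : String) : Int :=
  if ["2016", "2017", "2018"].any (fun y => PySem.Str.isIn y skim) then 0
  else if PySem.Str.isIn "radion" (PySem.Str.lower skim) then
    (if PySem.Str.isIn "vbf" (PySem.Str.lower skim) then -4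
     else if PySem.Str.isIn "ggf" (PySem.Str.lower skim) then -3
     else -100)  -- raise ValueError
  else if PySem.Str.isIn "graviton" (PySem.Str.lower skim) then
    (if PySem.Str.isIn "vbf" (PySem.Str.lower skim) then -2
     else if PySem.Str.isIn "ggf" (PySem.Str.lower skim) then -1
     else -100)  -- raise ValueError
  else
    if PySem.Str.isIn "DY_" skim then 1
    else if PySem.Str.isIn "TT_" skim then 2
    else if PySem.Str.isIn "ST_" skim then 3
    else if PySem.Str.isIn "WJets_" skim then 4
    else if PySem.Str.isIn "EWK" skim then 5
    else if ["TTZTo", "TTWJets"].any (fun s => PySem.Str.isIn s skim) then 6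
    else if ["TTWW", "TTWZ", "TTZZ"].any (fun s => PySem.Str.isIn s skim) then 7
    else if ["TTZH", "TTWH"].any (fun s => PySem.Str.isIn s skim) then 8
    else if PySem.Str.isIn "ttHTo" skim then 9
    else if ["VBFHTo", "GluGluHTo"].any (fun s => PySem.Str.isIn s skim) then 10
    else if PySem.Str.isIn "GGHH_SM" skim then 11
    else if ["WminusHTo", "WplusHTo"].any (fun s => PySem.Str.isIn s skim) then 12
    else if ["ZH_HTo", "ZHTo"].any (fun s => PySem.Str.isIn s skim) then 13
    else if ["WWW", "WWZ", "WZZ", "ZZZ"].any (fun s => PySem.Str.isIn s skim) then 14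
    else if ["WW", "WZ", "ZZ"].any (fun s => PySem.Str.isIn s skim) then 15
    else -100  -- raise ValueError

-- ===== PORT B =====
-- flat substring → id table (PATTERNS dict of Source B, insertion order)
def pvPatterns : List (String × Int) :=
  [("DY_", 1), ("TT_", 2), ("ST_", 3), ("WJets_", 4), ("EWK", 5),
   ("TTZTo", 6), ("TTWJets", 6),
   ("TTWW", 7), ("TTWZ", 7), ("TTZZ", 7),
   ("TTZH", 8), ("TTWH", 8),
   ("ttHTo", 9),
   ("VBFHTo", 10), ("GluGluHTo", 10),
   ("GGHH_SM", 11),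
   ("WminusHTo", 12), ("WplusHTo", 12),
   ("ZH_HTo", 13), ("ZHTo", 13),
   ("WWW", 14), ("WWZ", 14), ("WZZ", 14), ("ZZZ", 14),
   ("WW", 15), ("WZ", 15), ("ZZ", 15)]

def get_sample_id_alt (skim : String) : Int :=
  if ["2016", "2017", "2018"].any (fun y => PySem.Str.isIn y skim) then 0
  else
    let low := PySem.Str.lower skim
    if PySem.Str.isIn "radion" low || PySem.Str.isIn "graviton" low then
      if !PySem.Str.isIn "vbf" low && !PySem.Str.isIn "ggf" low then -100  -- raise ValueError
      else (if PySem.Str.isIn "radion" low then -4 else -2)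
           + (if PySem.Str.isIn "vbf" low then 0 else 1)
    else
      -- ids = [i for s, i in PATTERNS.items() if s in skim]; min(ids), raise if empty
      match PySem.List.min?
          ((pvPatterns.filter (fun p => PySem.Str.isIn p.1 skim)).map Prod.snd)
          (fun x => x) with
      | some v => v
      | none => -100  -- raise ValueError

-- ===== PRECONDITION & SPEC =====
-- Pre_ excludes exactly the inputs on which A raises ValueError: a radion/graviton skim
-- without vbf/ggf, and a non-year non-signal skim matching none of the listed substrings.
def Pre_get_sample_id (skim : String) : Prop :=
  (["2016", "2017", "2018"].any (fun y => PySem.Str.isIn y skim) = true) ∨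
  ((PySem.Str.isIn "radion" (PySem.Str.lower skim) = true ∨
    PySem.Str.isIn "graviton" (PySem.Str.lower skim) = true) ∧
   (PySem.Str.isIn "vbf" (PySem.Str.lower skim) = true ∨
    PySem.Str.isIn "ggf" (PySem.Str.lower skim) = true)) ∨
  (PySem.Str.isIn "radion" (PySem.Str.lower skim) = false ∧
   PySem.Str.isIn "graviton" (PySem.Str.lower skim) = false ∧
   (["DY_", "TT_", "ST_", "WJets_", "EWK", "TTZTo", "TTWJets", "TTWW", "TTWZ",
     "TTZZ", "TTZH", "TTWH", "ttHTo", "VBFHTo", "GluGluHTo", "GGHH_SM",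
     "WminusHTo", "WplusHTo", "ZH_HTo", "ZHTo", "WWW", "WWZ", "WZZ", "ZZZ",
     "WW", "WZ", "ZZ"].any (fun s => PySem.Str.isIn s skim) = true))
instance (skim : String) : Decidable (Pre_get_sample_id skim) := by
  unfold Pre_get_sample_id; infer_instance

def pvWitness_get_sample_id : String := "DY_skim"

def Spec_get_sample_id (skim : String) (out : Int) : Prop := out = get_sample_id_alt skim
instance (skim : String) (out : Int) : Decidable (Spec_get_sample_id skim out) := by
  unfold Spec_get_sample_id; infer_instance

-- ===== CLAIM =====
def Claim_equal_get_sample_id : Prop := ∀ (skim : String), Dom_get_sample_id skim → Pre_get_sample_id skim → Spec_get_sample_id skim (get_sample_id skim)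

-- ===== LEMMAS AND PROOFS =====

-- split a grouped any-test into successive ifs
theorem pv_if_false (x y : Int) : (if (false : Bool) = true then x else y) = y := rfl

theorem pv_if_or (a b : Bool) (x y : Int) :
    (if (a || b) = true then x else y) = (if a = true then x else if b = true then x else y) := by
  cases a <;> cases b <;> simp

-- first-match cascade over a rule list (proof-only model of A's else-chain)
def pvFirst (skim : String) : List (String × Int) → Int
  | [] => -100
  | (s, i) :: rest => if PySem.Str.isIn s skim then i else pvFirst skim rest

theorem pv_first_eq_min (skim : String) : ∀ (l : List (String × Int)),
    l.Pairwise (fun a b => a.2 ≤ b.2) →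
    l.any (fun p => PySem.Str.isIn p.1 skim) = true →
    pvFirst skim l =
      (match PySem.List.min?
          ((l.filter (fun p => PySem.Str.isIn p.1 skim)).map Prod.snd)
          (fun x => x) with
       | some v => v
       | none => -100) := by
  intro l
  induction l with
  | nil => intro _ h; simp at h
  | cons hd tl ih =>
    intro hp ha
    obtain ⟨s, i⟩ := hd
    rcases List.pairwise_cons.mp hp with ⟨hle, htl⟩
    cases hm : PySem.Str.isIn s skim with
    | true =>
      -- head matches: the minimum of i :: later matches is i
      have hfil : ((s, i) :: tl).filter (fun p => PySem.Str.isIn p.1 skim)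
          = (s, i) :: tl.filter (fun p => PySem.Str.isIn p.1 skim) := by
        rw [List.filter_cons, if_pos hm]
      have hall : ∀ y ∈ (tl.filter (fun p => PySem.Str.isIn p.1 skim)).map Prod.snd, i ≤ y := by
        intro y hy
        rcases List.mem_map.mp hy with ⟨p, hpmem, rfl⟩
        exact hle p (List.mem_of_mem_filter hpmem)
      have hfold : List.foldl min i ((tl.filter (fun p => PySem.Str.isIn p.1 skim)).map Prod.snd) = i := by
        generalize hT : (tl.filter (fun p => PySem.Str.isIn p.1 skim)).map Prod.snd = t at hall
        have h1 := (PySem.List.foldl_min_le t i).1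
        rcases PySem.List.foldl_min_mem t i with h2 | h2
        · exact h2
        · have := hall _ h2; omega
      have h1 : pvFirst skim ((s, i) :: tl) = i := by
        simp only [pvFirst]; rw [if_pos hm]
      rw [h1, hfil, List.map_cons, PySem.List.min?_id_cons, hfold]
    | false =>
      -- head does not match: recurse
      have ha' : tl.any (fun p => PySem.Str.isIn p.1 skim) = true := by
        simp only [List.any_cons, hm, Bool.false_or] at ha
        exact ha
      have hfil : ((s, i) :: tl).filter (fun p => PySem.Str.isIn p.1 skim)
          = tl.filter (fun p => PySem.Str.isIn p.1 skim) := by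
        rw [List.filter_cons, if_neg (by rw [hm]; exact Bool.false_ne_true)]
      have h1 : pvFirst skim ((s, i) :: tl) = pvFirst skim tl := by
        simp only [pvFirst]; rw [if_neg (by rw [hm]; exact Bool.false_ne_true)]
      rw [h1, hfil, ih htl ha']

theorem pv_patterns_sorted : pvPatterns.Pairwise (fun a b => a.2 ≤ b.2) := by decide

-- ===== VERDICT =====
theorem get_sample_id_spec : Claim_equal_get_sample_id := by
  intro skim _ hpre
  show get_sample_id skim = get_sample_id_alt skim
  cases hy : (["2016", "2017", "2018"].any (fun y => PySem.Str.isIn y skim)) with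
  | true => simp only [get_sample_id, get_sample_id_alt, hy, reduceIte]
  | false =>
  cases hr : PySem.Str.isIn "radion" (PySem.Str.lower skim) with
  | true =>
    -- radion branch: Pre gives vbf ∨ ggf
    have hvg : PySem.Str.isIn "vbf" (PySem.Str.lower skim) = true ∨
        PySem.Str.isIn "ggf" (PySem.Str.lower skim) = true := by
      rcases hpre with h | h | h
      · rw [hy] at h; exact Bool.noConfusion h
      · exact h.2
      · rw [h.1] at hr; exact Bool.noConfusion hr
    cases hv : PySem.Str.isIn "vbf" (PySem.Str.lower skim) with
    | true =>
      simp only [get_sample_id, get_sample_id_alt, hy, hr, hv, Bool.true_or,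
        Bool.not_true, Bool.false_and, reduceIte]
      norm_num
    | false =>
      have hgg : PySem.Str.isIn "ggf" (PySem.Str.lower skim) = true := by
        rcases hvg with h | h
        · rw [hv] at h; exact Bool.noConfusion h
        · exact h
      simp only [get_sample_id, get_sample_id_alt, hy, hr, hv, hgg, Bool.true_or,
        Bool.not_true, Bool.not_false, Bool.and_false, reduceIte]
      norm_num
  | false =>
  cases hg : PySem.Str.isIn "graviton" (PySem.Str.lower skim) with
  | true =>
    have hvg : PySem.Str.isIn "vbf" (PySem.Str.lower skim) = true ∨
        PySem.Str.isIn "ggf" (PySem.Str.lower skim) = true := by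
      rcases hpre with h | h | h
      · rw [hy] at h; exact Bool.noConfusion h
      · exact h.2
      · rw [h.2.1] at hg; exact Bool.noConfusion hg
    cases hv : PySem.Str.isIn "vbf" (PySem.Str.lower skim) with
    | true =>
      simp only [get_sample_id, get_sample_id_alt, hy, hr, hg, Bool.false_or, hv,
        Bool.not_true, Bool.false_and, reduceIte]
      norm_num
    | false =>
      have hgg : PySem.Str.isIn "ggf" (PySem.Str.lower skim) = true := by
        rcases hvg with h | h
        · rw [hv] at h; exact Bool.noConfusion h
        · exact h
      simp only [get_sample_id, get_sample_id_alt, hy, hr, hg, Bool.false_or, hv, hgg,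
        Bool.not_true, Bool.not_false, Bool.and_false, reduceIte]
      norm_num
  | false =>
    -- rule region: Pre gives some pattern matches
    have hany : pvPatterns.any (fun p => PySem.Str.isIn p.1 skim) = true := by
      rcases hpre with h | h | h
      · rw [hy] at h; exact Bool.noConfusion h
      · rcases h.1 with h1 | h1
        · rw [hr] at h1; exact Bool.noConfusion h1
        · rw [hg] at h1; exact Bool.noConfusion h1
      · have hb := h.2.2
        simp only [List.any_cons, List.any_nil, Bool.or_false] at hb
        simp only [pvPatterns, List.any_cons, List.any_nil, Bool.or_false]
        exact hb
    have hmin := pv_first_eq_min skim pvPatterns pv_patterns_sorted hany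
    have hchain : get_sample_id skim = pvFirst skim pvPatterns := by
      simp only [get_sample_id, hy, hr, hg, pv_if_false,
        List.any_cons, List.any_nil, Bool.or_false, pv_if_or, pvPatterns, pvFirst]
    have halt : get_sample_id_alt skim =
        (match PySem.List.min?
            ((pvPatterns.filter (fun p => PySem.Str.isIn p.1 skim)).map Prod.snd)
            (fun x => x) with
         | some v => v
         | none => -100) := by
      simp only [get_sample_id_alt, hy, hr, hg, Bool.or_self, pv_if_false]
    rw [hchain, hmin, halt]
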